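-- pv_equiv track=rewrite | github.com/Fan1c/Laba | Laba5(1 part).py | generate_matrices_pythonic
-- ===== SOURCE A (Python) =====
-- import itertools
--
-- def generate_matrices_pythonic(matrix):
--     #Генерирует перестановки строк и столбцов матрицы, используя срезы списков
--     n = len(matrix)
--     row_permutations = list(itertools.permutations(range(n)))
--     col_permutations = list(itertools.permutations(range(n)))
--
--     matrices = []
--     for row_perm in row_permutations:
--         for col_perm in col_permutations:
--             new_matrix = []
--             for i in row_perm:
--                 row = []
--                 for j in col_perm:
--                     row.append(matrix[i][j])
--                 new_matrix.append(row)
--             matrices.append(new_matrix)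
--     return matrices
-- ===== SOURCE B (Python) =====
-- def _fact(n):
--     f = 1
--     for i in range(2, n + 1):
--         f *= i
--     return f
--
-- def _kth_perm(n, k):
--     # k-th lexicographic permutation of [0..n-1], decoded by factorial-base (Lehmer code) arithmetic
--     pool = list(range(n))
--     out = []
--     while pool:
--         f = _fact(len(pool) - 1)
--         q, k = divmod(k, f)
--         out.append(pool.pop(q))
--     return out
--
-- def generate_matrices_pythonic(matrix):
--     # Enumerates permutation pairs by one integer counter and Lehmer-code decoding (no itertools).
--     n = len(matrix)
--     f = _fact(n)
--     return [
--         [[matrix[i][j] for j in _kth_perm(n, c)] for i in _kth_perm(n, r)]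
--         for r in range(f)
--         for c in range(f)
--     ]
-- ===== Notes on version B (the rewrite author's own statement) =====
-- stated objective: alternative
-- what changed: B drops itertools and the precomputed permutation lists: it runs one integer counter over range(n!)^2 and decodes each counter value into the k-th lexicographic permutation by factorial-base (Lehmer code) divmod arithmetic, building each output matrix from the two decoded permutations.
import Mathlib
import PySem

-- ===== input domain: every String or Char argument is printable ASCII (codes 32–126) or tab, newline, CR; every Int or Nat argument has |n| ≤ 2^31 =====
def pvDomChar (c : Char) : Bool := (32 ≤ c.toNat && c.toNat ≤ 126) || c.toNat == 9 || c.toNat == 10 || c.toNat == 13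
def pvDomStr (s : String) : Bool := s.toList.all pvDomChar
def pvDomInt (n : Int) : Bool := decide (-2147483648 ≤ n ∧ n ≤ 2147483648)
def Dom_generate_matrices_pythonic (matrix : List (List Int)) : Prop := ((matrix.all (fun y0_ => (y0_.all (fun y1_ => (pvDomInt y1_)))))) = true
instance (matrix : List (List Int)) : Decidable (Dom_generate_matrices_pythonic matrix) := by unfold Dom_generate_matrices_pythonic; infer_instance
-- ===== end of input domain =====

-- B replaces A's itertools permutation lists by one integer counter over (n!)^2 whose values are
-- decoded into lexicographic permutations via factorial-base (Lehmer code) divmod arithmetic: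
-- alternative algorithm, same cost.


-- ===== PORT A =====
-- itertools.permutations(range(n)) : lexicographic permutations of a sorted duplicate-free list
def pyPerms (l : List Nat) : List (List Nat) :=
  if l = [] then [[]]
  else l.attach.flatMap (fun x => (pyPerms (l.erase x.1)).map (fun p => x.1 :: p))
termination_by l.length
decreasing_by
  have hm := x.2
  have := List.length_erase_of_mem hm
  have hpos : 0 < l.length := List.length_pos_of_mem hm
  omega

def generate_matrices_pythonic (matrix : List (List Int)) : List (List (List Int)) :=
  let n := matrix.length
  let row_permutations := pyPerms (List.range n)
  let col_permutations := pyPerms (List.range n)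
  row_permutations.foldl (fun matrices row_perm =>
    col_permutations.foldl (fun matrices col_perm =>
      let new_matrix :=
        row_perm.foldl (fun new_matrix i =>
          let row := col_perm.foldl (fun row j =>
            -- matrix[i][j]: in range under Pre_ (i,j < n ≤ each row's length); default 0/[] never used there
            row ++ [(matrix.getD i []).getD j 0]) []
          new_matrix ++ [row]) []
      matrices ++ [new_matrix]) matrices) []

-- ===== PORT B =====
-- _kth_perm: pop-loop on the pool, decoding k in factorial base; the `q < pool.length` guard only
-- makes the recursion total (with k < (len pool)! it always holds, matching Python's pop(q)).
def kthPerm : List Nat → Nat → List Nat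
  | [], _ => []
  | a :: t, k =>
    if hq : k / Nat.factorial t.length < t.length + 1 then
      (a :: t)[k / Nat.factorial t.length] ::
        kthPerm ((a :: t).eraseIdx (k / Nat.factorial t.length)) (k % Nat.factorial t.length)
    else []
termination_by pool _ => pool.length
decreasing_by simp only [List.length_eraseIdx, List.length_cons]; split <;> omega

def generate_matrices_pythonic_alt (matrix : List (List Int)) : List (List (List Int)) :=
  let n := matrix.length
  let f := Nat.factorial n
  (List.range f).flatMap (fun r =>
    (List.range f).map (fun c =>
      (kthPerm (List.range n) r).map (fun i =>
        (kthPerm (List.range n) c).map (fun j => (matrix.getD i []).getD j 0))))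

-- ===== PRECONDITION & SPEC =====
-- Pre_ excludes exactly the ragged matrices (some row shorter than len(matrix)), on which Python A raises IndexError.
def Pre_generate_matrices_pythonic (matrix : List (List Int)) : Prop :=
  ∀ r ∈ matrix, matrix.length ≤ r.length
instance (matrix : List (List Int)) : Decidable (Pre_generate_matrices_pythonic matrix) := by unfold Pre_generate_matrices_pythonic; infer_instance
def pvWitness_generate_matrices_pythonic : List (List Int) := [[1, 2], [3, 4]]
def Spec_generate_matrices_pythonic (matrix : List (List Int)) (out : List (List (List Int))) : Prop := out = generate_matrices_pythonic_alt matrix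
instance (matrix : List (List Int)) (out : List (List (List Int))) : Decidable (Spec_generate_matrices_pythonic matrix out) := by unfold Spec_generate_matrices_pythonic; infer_instance

-- ===== CLAIM =====
def Claim_equal_generate_matrices_pythonic : Prop := ∀ (matrix : List (List Int)), Dom_generate_matrices_pythonic matrix → Pre_generate_matrices_pythonic matrix → Spec_generate_matrices_pythonic matrix (generate_matrices_pythonic matrix)

-- ===== LEMMAS AND PROOFS =====

-- range over a product splits into blocks of size f
theorem range_mul_flatMap {γ : Type} (s f : Nat) (g : Nat → γ) :
    (List.range (s * f)).map g
      = (List.range s).flatMap (fun q => (List.range f).map (fun r => g (q * f + r))) := by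
  induction s with
  | zero => simp
  | succ s ih =>
    have h : (s + 1) * f = s * f + f := by ring
    rw [h, List.range_add, List.map_append, ih, List.range_succ, List.flatMap_append]
    simp [List.map_map, Function.comp_def, Nat.mul_comm]

-- indexing range(len(l)) into l collapses to iterating over l
theorem flatMap_range_getD {β : Type} (l : List Nat) (g : Nat → List β) :
    (List.range l.length).flatMap (fun q => g (l.getD q 0)) = l.flatMap g := by
  induction l with
  | nil => simp
  | cons a t ih =>
    simp [List.range_succ_eq_map, List.flatMap_cons, List.flatMap_map, ← ih]

-- one decoding step of kthPerm at index q*f + r, r < (len-1)!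
theorem kthPerm_step (l : List Nat) (hl : l ≠ []) (q r : Nat)
    (hq : q < l.length) (hr : r < Nat.factorial (l.length - 1)) :
    kthPerm l (q * Nat.factorial (l.length - 1) + r)
      = l[q] :: kthPerm (l.eraseIdx q) r := by
  obtain ⟨a, t, rfl⟩ := List.exists_cons_of_ne_nil hl
  have hf : 0 < Nat.factorial t.length := Nat.factorial_pos _
  simp only [List.length_cons, Nat.add_sub_cancel] at hr ⊢
  have hdiv : (q * Nat.factorial t.length + r) / Nat.factorial t.length = q := by
    rw [Nat.mul_comm q, Nat.mul_add_div hf, Nat.div_eq_of_lt hr, Nat.add_zero]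
  have hmod : (q * Nat.factorial t.length + r) % Nat.factorial t.length = r := by
    rw [Nat.mul_comm q, Nat.mul_add_mod]
    exact Nat.mod_eq_of_lt hr
  rw [kthPerm]
  simp only [hdiv, hmod]
  rw [dif_pos (by simpa using hq)]

-- the Lehmer-code enumeration equals the recursive lexicographic enumeration, for duplicate-free pools
theorem map_kthPerm (l : List Nat) (hnd : l.Nodup) :
    (List.range l.length.factorial).map (kthPerm l) = pyPerms l := by
  induction hn : l.length using Nat.strong_induction_on generalizing l with
  | _ n ih =>
  subst hn
  rw [pyPerms]
  by_cases hnil : l = []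
  · subst hnil; simp [kthPerm, List.range_succ]
  · rw [if_neg hnil]
    have hpos : 0 < l.length := List.length_pos_of_ne_nil hnil
    have hfac : l.length.factorial = l.length * (l.length - 1).factorial := by
      obtain ⟨a, t, rfl⟩ := List.exists_cons_of_ne_nil hnil
      simp [Nat.factorial_succ]
    rw [hfac, range_mul_flatMap]
    have hblock : ∀ q ∈ List.range l.length,
        (List.range (l.length - 1).factorial).map
            (fun r => kthPerm l (q * (l.length - 1).factorial + r))
          = (fun v => (pyPerms (l.erase v)).map (fun p => v :: p)) (l.getD q 0) := by
      intro q hq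
      rw [List.mem_range] at hq
      have hgd : l.getD q 0 = l[q] := List.getD_eq_getElem l 0 hq
      have herase : l.erase l[q] = l.eraseIdx q := List.Nodup.erase_getElem hnd q hq
      have hmem : l[q] ∈ l := List.getElem_mem hq
      have hlene : (l.erase l[q]).length = l.length - 1 := List.length_erase_of_mem hmem
      have hih : (List.range (l.erase l[q]).length.factorial).map (kthPerm (l.erase l[q]))
          = pyPerms (l.erase l[q]) :=
        ih (l.erase l[q]).length (by omega) _ (hnd.erase _) rfl
      calc (List.range (l.length - 1).factorial).map
              (fun r => kthPerm l (q * (l.length - 1).factorial + r))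
          = (List.range (l.length - 1).factorial).map
              (fun r => l[q] :: kthPerm (l.eraseIdx q) r) := by
            apply List.map_congr_left
            intro r hr
            exact kthPerm_step l hnil q r hq (List.mem_range.mp hr)
        _ = ((List.range (l.erase l[q]).length.factorial).map (kthPerm (l.erase l[q]))).map
              (fun p => l[q] :: p) := by
            rw [hlene, herase, List.map_map]; rfl
        _ = (pyPerms (l.erase (l.getD q 0))).map (fun p => l.getD q 0 :: p) := by
            rw [hih, hgd]
    rw [List.flatMap_congr hblock,
      flatMap_range_getD l (fun v => (pyPerms (l.erase v)).map (fun p => v :: p))]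
    simp

-- ===== VERDICT =====
theorem generate_matrices_pythonic_spec : Claim_equal_generate_matrices_pythonic := by
  intro matrix _ _
  unfold Spec_generate_matrices_pythonic generate_matrices_pythonic generate_matrices_pythonic_alt
  simp only [PySem.List.foldl_append_singleton_eq_map, PySem.List.foldl_append_eq_flatMap,
    List.nil_append]
  rw [← map_kthPerm (List.range matrix.length) (List.nodup_range)]
  simp [List.length_range, List.flatMap_map, List.map_map, Function.comp_def]
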